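-- pv_equiv track=rewrite | github.com/itai-hania/HFI | src/scraper/scraper.py | filter_author_tweets_only
-- ===== SOURCE A (Python) =====
-- from typing import Dict, List, Optional
--
-- def filter_author_tweets_only(tweets: List[Dict], target_handle: str) -> List[Dict]:
--     """
--     Filter to target author's thread tweets.
--     Tolerates single interspersed non-author tweets (quoted tweets, UI artifacts)
--     but stops at 2+ consecutive non-author tweets (end of thread).
--     """
--     if not tweets or not target_handle:
--         return tweets
--     target = target_handle.lower().lstrip('@')
--     sorted_tweets = sorted(tweets, key=lambda t: t.get('timestamp') or '')
--     root_idx = -1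
--     for idx, t in enumerate(sorted_tweets):
--         author = t.get('author_handle', '').lower().lstrip('@')
--         if author == target:
--             root_idx = idx
--             break
--     if root_idx == -1:
--         return []
--     result = []
--     consecutive_non_author = 0
--     for t in sorted_tweets[root_idx:]:
--         author = t.get('author_handle', '').lower().lstrip('@')
--         if author == target:
--             result.append(t)
--             consecutive_non_author = 0
--         else:
--             consecutive_non_author += 1
--             if consecutive_non_author >= 2:
--                 break
--     return result
-- ===== SOURCE B (Python) =====
-- def _cut(flags):
--     """Length of the prefix of `flags` before the first adjacent pair of Falses."""
--     n = len(flags)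
--     for i in range(n - 1):
--         if not flags[i] and not flags[i + 1]:
--             return i
--     return n
--
--
-- def filter_author_tweets_only(tweets, target_handle):
--     if not tweets or not target_handle:
--         return tweets
--     target = target_handle.lower().lstrip('@')
--     s = sorted(tweets, key=lambda t: t.get('timestamp') or '')
--     flags = [t.get('author_handle', '').lower().lstrip('@') == target for t in s]
--     try:
--         start = flags.index(True)
--     except ValueError:
--         return []
--     cut = _cut(flags[start:])
--     return [t for t, f in zip(s[start:start + cut], flags[start:start + cut]) if f]
-- ===== Notes on version B (the rewrite author's own statement) =====
-- stated objective: alternative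
-- what changed: A's two imperative scans with mutable state (enumerate-and-break to find the root index, then slice-and-rescan carrying a consecutive-miss counter) are replaced by a staged list-pipeline: compute the author-match flag list once, locate the first True with list.index, cut the tail at the first adjacent pair of Falses by a pairwise scan over flags only, and produce the result as a zip-comprehension filter.
import Mathlib
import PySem

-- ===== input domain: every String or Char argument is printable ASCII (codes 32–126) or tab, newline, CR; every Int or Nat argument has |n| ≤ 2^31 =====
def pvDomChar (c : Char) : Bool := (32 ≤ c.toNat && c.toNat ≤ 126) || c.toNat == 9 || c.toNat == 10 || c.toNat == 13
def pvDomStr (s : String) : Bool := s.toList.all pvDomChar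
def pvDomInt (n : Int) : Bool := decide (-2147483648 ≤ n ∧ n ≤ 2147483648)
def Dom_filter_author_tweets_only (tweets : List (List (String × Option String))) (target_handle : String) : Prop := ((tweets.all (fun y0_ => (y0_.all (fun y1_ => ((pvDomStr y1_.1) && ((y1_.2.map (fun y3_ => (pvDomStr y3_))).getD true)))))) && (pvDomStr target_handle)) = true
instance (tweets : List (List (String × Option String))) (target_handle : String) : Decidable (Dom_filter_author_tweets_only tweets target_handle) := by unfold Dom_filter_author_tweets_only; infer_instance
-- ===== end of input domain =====

-- B replaces A's two mutable-state scans (find root index, then slice-and-rescan with a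
-- miss counter) by a staged pipeline: flag list, index of first True, pairwise cut over
-- the flags, zip-filter (objective: alternative, same cost).


-- ===== PORT A =====
-- s.lower().lstrip('@') : exact — lstrip('@') removes exactly the leading '@' characters
def pvNorm (s : String) : String := String.mk ((PySem.Str.lower s).toList.dropWhile (fun c => c == '@'))

-- t.get('author_handle', '').lower().lstrip('@'); Pre_ excludes a stored None value, so getD "" is exact
def pvAuthor (t : List (String × Option String)) : String := pvNorm (((t.lookup "author_handle").getD (some "")).getD "")

-- key=lambda t: t.get('timestamp') or ''
def pvTsKey (t : List (String × Option String)) : String := ((t.lookup "timestamp").getD none).getD ""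

-- first loop of A: enumerate + break, yielding root_idx (-1 if absent)
def pvFindRoot (s : List (List (String × Option String))) (target : String) (idx : Nat) : Int :=
  match s with
  | [] => -1
  | t :: rest => if pvAuthor t = target then (idx : Int) else pvFindRoot rest target (idx + 1)

-- second loop of A over sorted_tweets[root_idx:], carrying result and the consecutive-miss counter
def pvScan (l : List (List (String × Option String))) (target : String)
    (result : List (List (String × Option String))) (c : Nat) : List (List (String × Option String)) :=
  match l with
  | [] => result
  | t :: rest =>
    if pvAuthor t = target then pvScan rest target (result ++ [t]) 0
    else if c + 1 ≥ 2 then result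
    else pvScan rest target result (c + 1)

def filter_author_tweets_only (tweets : List (List (String × Option String))) (target_handle : String) : List (List (String × Option String)) :=
  if tweets = [] ∨ target_handle = "" then tweets
  else
    let target := pvNorm target_handle
    let sorted_tweets := PySem.List.sorted tweets (fun t => pvTsKey t) false
    let root_idx := pvFindRoot sorted_tweets target 0
    if root_idx = -1 then []
    else pvScan (PySem.List.slice sorted_tweets (some root_idx) none) target [] 0

-- ===== PORT B =====
-- _cut(flags): length of the prefix of flags before the first adjacent pair of Falses
-- (the index loop 'for i in range(n-1)' as the obvious pairwise structural recursion)
def pvCut : List Bool → Nat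
  | [] => 0
  | [_] => 1
  | f1 :: f2 :: rest => if !f1 && !f2 then 0 else 1 + pvCut (f2 :: rest)

def filter_author_tweets_only_alt (tweets : List (List (String × Option String))) (target_handle : String) : List (List (String × Option String)) :=
  if tweets = [] ∨ target_handle = "" then tweets
  else
    let target := pvNorm target_handle
    let s := PySem.List.sorted tweets (fun t => pvTsKey t) false
    let flags := s.map (fun t => pvAuthor t == target)
    match PySem.List.index? flags true with      -- flags.index(True); ValueError → []
    | none => []
    | some start =>
      let cut := pvCut (PySem.List.slice flags (some (start : Int)) none)
      ((PySem.List.slice s (some (start : Int)) (some ((start : Int) + (cut : Int)))).zip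
        (PySem.List.slice flags (some (start : Int)) (some ((start : Int) + (cut : Int))))).filterMap
        (fun p => if p.2 then some p.1 else none)

-- ===== PRECONDITION & SPEC =====
-- Pre_ excludes inputs where some tweet stores None under 'author_handle' (there
-- `.lower()` raises AttributeError when reached); this is slightly narrower than A's
-- exact domain: A returns normally if its early break stops before the None-valued tweet.
def Pre_filter_author_tweets_only (tweets : List (List (String × Option String))) (target_handle : String) : Prop :=
  tweets = [] ∨ target_handle = "" ∨ ∀ t ∈ tweets, t.lookup "author_handle" ≠ some none
instance (tweets : List (List (String × Option String))) (target_handle : String) : Decidable (Pre_filter_author_tweets_only tweets target_handle) := by unfold Pre_filter_author_tweets_only; infer_instance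
def pvWitness_filter_author_tweets_only : (List (List (String × Option String))) × String :=
  ([[("author_handle", some "@A"), ("timestamp", some "1")], [("timestamp", some "0")]], "a")

def Spec_filter_author_tweets_only (tweets : List (List (String × Option String))) (target_handle : String) (out : List (List (String × Option String))) : Prop := out = filter_author_tweets_only_alt tweets target_handle
instance (tweets : List (List (String × Option String))) (target_handle : String) (out : List (List (String × Option String))) : Decidable (Spec_filter_author_tweets_only tweets target_handle out) := by unfold Spec_filter_author_tweets_only; infer_instance

-- ===== CLAIM (what is proved, stated in full; the proofs are below) =====
def Claim_equal_filter_author_tweets_only : Prop := ∀ (tweets : List (List (String × Option String))) (target_handle : String), Dom_filter_author_tweets_only tweets target_handle → Pre_filter_author_tweets_only tweets target_handle → Spec_filter_author_tweets_only tweets target_handle (filter_author_tweets_only tweets target_handle)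

-- ===== LEMMAS AND PROOFS =====

-- the Bool author-match flag
def pvF (target : String) (t : List (String × Option String)) : Bool := pvAuthor t == target

theorem pvCut_true (bs : List Bool) : pvCut (true :: bs) = 1 + pvCut bs := by
  cases bs <;> simp [pvCut]

-- A's find-root loop returns -1 / the index of the first True flag
theorem root_eq_index (target : String) (s : List (List (String × Option String))) (n : Nat) :
    pvFindRoot s target n =
      (match PySem.List.index? (s.map (pvF target)) true with
       | none => -1
       | some i => (n : Int) + i) := by
  induction s generalizing n with
  | nil => simp [pvFindRoot, PySem.List.index?]
  | cons t rest ih =>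
    by_cases h : pvAuthor t = target
    · have hf : pvF target t = true := by simp [pvF, h]
      rw [pvFindRoot, if_pos h, List.map_cons, hf, PySem.List.index?_cons_self]
      simp
    · have hf : pvF target t = false := by simp [pvF, h]
      rw [pvFindRoot, if_neg h, ih (n + 1), List.map_cons, hf,
        PySem.List.index?_cons_of_ne (rest.map (pvF target)) (by simp)]
      cases PySem.List.index? (rest.map (pvF target)) true with
      | none => rfl
      | some i => simp; ring

-- A's scan loop, both live counter states, characterised by pvCut + filter
theorem scan_char (target : String) : ∀ (n : Nat) (l : List (List (String × Option String))),
    l.length ≤ n → ∀ r,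
    (pvScan l target r 0 = r ++ (l.take (pvCut (l.map (pvF target)))).filter (pvF target)) ∧
    (pvScan l target r 1 = r ++ (match l with
       | [] => []
       | y :: r2 => if pvF target y then
            y :: (r2.take (pvCut (r2.map (pvF target)))).filter (pvF target) else [])) := by
  intro n
  induction n with
  | zero =>
    intro l hl r
    have : l = [] := List.eq_nil_of_length_eq_zero (Nat.le_zero.mp hl)
    subst this
    simp [pvScan, pvCut]
  | succ n ih =>
    intro l hl r
    cases l with
    | nil => simp [pvScan, pvCut]
    | cons x rest =>
      have hr : rest.length ≤ n := by simpa using hl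
      constructor
      · -- counter 0
        by_cases h : pvAuthor x = target
        · have hf : pvF target x = true := by simp [pvF, h]
          rw [pvScan, if_pos h, (ih rest hr (r ++ [x])).1]
          rw [List.map_cons, hf, pvCut_true, Nat.add_comm 1 (pvCut (rest.map (pvF target)))]
          simp [List.take_succ_cons, hf]
        · have hf : pvF target x = false := by simp [pvF, h]
          rw [pvScan, if_neg h, if_neg (by omega), (ih rest hr r).2]
          cases rest with
          | nil => simp [pvCut, hf]
          | cons y r2 =>
            by_cases hy : pvAuthor y = target
            · have hfy : pvF target y = true := by simp [pvF, hy]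
              rw [List.map_cons, List.map_cons, hf, hfy]
              rw [show pvCut (false :: true :: r2.map (pvF target))
                    = pvCut (r2.map (pvF target)) + 1 + 1 from by
                      rw [show pvCut (false :: true :: r2.map (pvF target))
                            = 1 + pvCut (true :: r2.map (pvF target)) from by simp [pvCut],
                        pvCut_true]
                      omega]
              simp [List.take_succ_cons, hf, hfy]
            · have hfy : pvF target y = false := by simp [pvF, hy]
              rw [List.map_cons, List.map_cons, hf, hfy]
              simp [pvCut, hfy]
      · -- counter 1: one unfolding plus the counter-0 characterisation on the tail
        by_cases h : pvAuthor x = target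
        · have hf : pvF target x = true := by simp [pvF, h]
          rw [pvScan, if_pos h, (ih rest hr (r ++ [x])).1]
          simp [hf]
        · have hf : pvF target x = false := by simp [pvF, h]
          rw [pvScan, if_neg h, if_pos (by omega)]
          simp [hf]

-- zip-with-own-flags comprehension is a filter
theorem zip_flags_filter (target : String) (m : List (List (String × Option String))) :
    (m.zip (m.map (pvF target))).filterMap (fun p => if p.2 then some p.1 else none)
      = m.filter (pvF target) := by
  induction m with
  | nil => rfl
  | cons x rest ih =>
    by_cases h : pvF target x = true <;>
      simp [List.zip_cons_cons, h, ih]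

-- the core equality on the sorted list, with the shared normalised target
theorem core_eq (target : String) (s : List (List (String × Option String))) :
    (if pvFindRoot s target 0 = -1 then ([] : List (List (String × Option String)))
     else pvScan (PySem.List.slice s (some (pvFindRoot s target 0)) none) target [] 0)
    = (match PySem.List.index? (s.map (fun t => pvAuthor t == target)) true with
       | none => []
       | some start =>
         ((PySem.List.slice s (some (start : Int))
             (some ((start : Int) + (pvCut (PySem.List.slice (s.map (fun t => pvAuthor t == target)) (some (start : Int)) none) : Int)))).zip
          (PySem.List.slice (s.map (fun t => pvAuthor t == target)) (some (start : Int))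
             (some ((start : Int) + (pvCut (PySem.List.slice (s.map (fun t => pvAuthor t == target)) (some (start : Int)) none) : Int))))).filterMap
          (fun p => if p.2 then some p.1 else none)) := by
  have hmap : s.map (fun t => pvAuthor t == target) = s.map (pvF target) := rfl
  rw [hmap, root_eq_index target s 0]
  cases hidx : PySem.List.index? (s.map (pvF target)) true with
  | none => simp
  | some start =>
    try simp only [PySem.List.slice_natCast_add, PySem.List.slice_from_natCast]
    rw [if_neg (by push_cast; omega : (((0 : Nat) : Int) + (start : Int)) ≠ -1)]
    rw [show (((0 : Nat) : Int) + (start : Int)) = ((start : Nat) : Int) from by push_cast; ring]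
    rw [PySem.List.slice_from_natCast]
    have hdropmap : (s.map (pvF target)).drop start = (s.drop start).map (pvF target) := by
      simp [List.map_drop]
    rw [hdropmap, ← List.map_take, zip_flags_filter]
    exact ((scan_char target (s.drop start).length (s.drop start) le_rfl []).1).trans (by simp)

-- ===== VERDICT (by name: the statement is the Claim_ definition above) =====
theorem filter_author_tweets_only_spec : Claim_equal_filter_author_tweets_only := by
  intro tweets target_handle _ _
  unfold Spec_filter_author_tweets_only filter_author_tweets_only filter_author_tweets_only_alt
  split
  · rfl
  · exact core_eq (pvNorm target_handle) (PySem.List.sorted tweets (fun t => pvTsKey t) false)
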